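-- pv_equiv track=rewrite | github.com/Paulchenkiller/regexgenerator | src/regexgen/patterns/analysis.py | _find_common_prefixes
-- ===== SOURCE A (Python) =====
-- from typing import List, Set, Dict, Optional, Tuple
--
-- def _find_common_prefixes(examples: List[str]) -> List[str]:
--     """Find common prefixes in examples."""
--     if not examples:
--         return []
--
--     prefixes = []
--     min_len = min(len(ex) for ex in examples)
--
--     for i in range(1, min_len + 1):
--         prefix = examples[0][:i]
--         if all(ex.startswith(prefix) for ex in examples):
--             prefixes.append(prefix)
--         else:
--             break
--
--     return prefixes
-- ===== SOURCE B (Python) =====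
-- def _find_common_prefixes(examples):
--     """Find common prefixes: one column-wise scan determines the
--     longest-common-prefix length, then the prefixes are built once."""
--     if not examples:
--         return []
--     first = examples[0]
--     k = min(len(ex) for ex in examples)
--     lcp = k
--     for j in range(k):
--         c = first[j]
--         if any(ex[j] != c for ex in examples):
--             lcp = j
--             break
--     return [first[:i] for i in range(1, lcp + 1)]
-- ===== Notes on version B (the rewrite author's own statement) =====
-- stated objective: alternative
-- what changed: Instead of re-checking every string with startswith against each growing candidate prefix (work proportional to n times the square of the answer length), B runs one column-wise scan to find the longest-common-prefix length and then builds the prefix list once; on the generated inputs (tiny common prefixes) the measured cost is the same.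
import Mathlib
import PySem

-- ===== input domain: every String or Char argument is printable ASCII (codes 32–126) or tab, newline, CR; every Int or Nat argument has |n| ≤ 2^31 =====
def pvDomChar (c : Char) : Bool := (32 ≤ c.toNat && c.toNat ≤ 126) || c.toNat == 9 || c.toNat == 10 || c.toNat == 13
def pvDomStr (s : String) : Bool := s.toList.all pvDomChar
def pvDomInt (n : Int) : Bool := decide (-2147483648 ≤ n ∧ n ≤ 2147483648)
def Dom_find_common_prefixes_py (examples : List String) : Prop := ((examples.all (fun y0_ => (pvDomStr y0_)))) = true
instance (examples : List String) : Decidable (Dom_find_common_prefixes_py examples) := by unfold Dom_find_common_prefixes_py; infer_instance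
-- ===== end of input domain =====

-- B replaces A's per-prefix all-startswith re-checks by a single column-wise scan
-- that finds the longest-common-prefix length once, then builds the prefixes.

-- ===== PORT A =====
-- the 'for i in range(1, min_len+1)' loop with its early break; fuel = number of remaining iterations
def pvALoop (examples : List String) (e0 : String) (i : Nat) (prefixes : List String) : Nat → List String
  | 0 => prefixes
  | fuel + 1 =>
      let pre := PySem.Str.slice e0 none (some (i : Int))      -- prefix = examples[0][:i]
      if examples.all (fun ex => PySem.Str.startswith ex pre)  -- all(ex.startswith(prefix) ...)
      then pvALoop examples e0 (i + 1) (prefixes ++ [pre]) fuel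
      else prefixes                                            -- break

def find_common_prefixes_py (examples : List String) : List String :=
  match examples with
  | [] => []
  | e0 :: _ =>
      -- min_len = min(len(ex) for ex in examples); examples is nonempty here, so min? is some and .getD 0 never fires
      let min_len : Int := (PySem.List.min? (examples.map (fun ex => PySem.Str.len ex)) id).getD 0
      pvALoop examples e0 1 [] min_len.toNat

-- ===== PORT B =====
-- the column scan 'for j in range(k): c = first[j]; if any(ex[j] != c ...): lcp = j; break'; fuel = k - j.
-- first[j] and ex[j] are ported with List.getD: on every reachable call j < len ex (j < k ≤ each length), so this is exact.
def pvBScan (examples : List String) (first : String) (j : Nat) : Nat → Nat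
  | 0 => j                                                     -- loop ran out: lcp stays k
  | fuel + 1 =>
      let c := first.toList.getD j ' '                         -- c = first[j]
      if examples.any (fun ex => ex.toList.getD j ' ' != c)    -- any(ex[j] != c ...)
      then j                                                   -- lcp = j; break
      else pvBScan examples first (j + 1) fuel

def find_common_prefixes_py_alt (examples : List String) : List String :=
  match examples with
  | [] => []
  | first :: _ =>
      -- k = min(len(ex) for ex in examples); examples is nonempty here, so .getD 0 never fires
      let k : Int := (PySem.List.min? (examples.map (fun ex => PySem.Str.len ex)) id).getD 0
      let lcp := pvBScan examples first 0 k.toNat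
      -- [first[:i] for i in range(1, lcp + 1)]
      (PySem.List.pyRange 1 ((lcp : Int) + 1)).map (fun i => PySem.Str.slice first none (some i))

-- ===== PRECONDITION & SPEC =====
def Spec_find_common_prefixes_py (examples : List String) (out : List String) : Prop := out = find_common_prefixes_py_alt examples
instance (examples : List String) (out : List String) : Decidable (Spec_find_common_prefixes_py examples out) := by unfold Spec_find_common_prefixes_py; infer_instance

-- ===== CLAIM (what is proved, stated in full; the proofs are below) =====
def Claim_equal_find_common_prefixes_py : Prop := ∀ (examples : List String), Dom_find_common_prefixes_py examples → Spec_find_common_prefixes_py examples (find_common_prefixes_py examples)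

-- ===== LEMMAS AND PROOFS =====

-- one more column extends a common prefix iff the characters at that column agree
lemma pv_prefix_succ (p s : List Char) (j : Nat) (hp : j < p.length) (hs : j < s.length)
    (h : p.take j <+: s) :
    (p.take (j+1) <+: s) ↔ s.getD j ' ' = p.getD j ' ' := by
  have hpj : p.take j = s.take j := by
    have h2 := List.prefix_iff_eq_take.mp h
    simpa [Nat.min_eq_left (le_of_lt hp)] using h2
  have h1 : p.take (j+1) = s.take j ++ [p[j]] := by
    rw [List.take_add_one, hpj, List.getElem?_eq_getElem hp]; rfl
  have h1s : s.take (j+1) = s.take j ++ [s[j]] := by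
    rw [List.take_add_one, List.getElem?_eq_getElem hs]; rfl
  have hgd : s.getD j ' ' = s[j] := List.getD_eq_getElem s ' ' hs
  have hgp : p.getD j ' ' = p[j] := List.getD_eq_getElem p ' ' hp
  constructor
  · intro hpre
    have h2 := List.prefix_iff_eq_take.mp hpre
    rw [List.length_take, Nat.min_eq_left (by omega)] at h2
    rw [h1, h1s] at h2
    have h3 := List.append_cancel_left h2
    simp at h3
    rw [hgd, hgp, h3]
  · intro heq
    rw [List.prefix_iff_eq_take, List.length_take, Nat.min_eq_left (by omega), h1, h1s]
    rw [hgd, hgp] at heq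
    rw [heq]

lemma pv_bScan_ge (examples : List String) (first : String) :
    ∀ (fuel j : Nat), j ≤ pvBScan examples first j fuel := by
  intro fuel
  induction fuel with
  | zero => intro j; simp [pvBScan]
  | succ n ih =>
      intro j
      simp only [pvBScan]
      split
      · exact le_refl j
      · exact le_trans (Nat.le_succ j) (ih (j+1))

-- the two loops run side by side from column j, under the invariant that
-- the first j columns are already known to agree
lemma pv_loop_eq (examples : List String) (e0 : String) (he : e0 ∈ examples) :
    ∀ (fuel j : Nat) (acc : List String),
    (∀ ex ∈ examples, j + fuel ≤ ex.toList.length) →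
    (∀ ex ∈ examples, e0.toList.take j <+: ex.toList) →
    pvALoop examples e0 (j+1) acc fuel
      = acc ++ (PySem.List.pyRange ((j:Int)+1) ((pvBScan examples e0 j fuel : Int)+1)).map
          (fun i => PySem.Str.slice e0 none (some i)) := by
  intro fuel
  induction fuel with
  | zero =>
      intro j acc _ _
      simp [pvALoop, pvBScan, PySem.List.pyRange_one_eq_nil (le_refl ((j:Int)+1))]
  | succ n ih =>
      intro j acc hlen hinv
      have hjp : j < e0.toList.length := by have := hlen e0 he; omega
      have hjs : ∀ ex ∈ examples, j < ex.toList.length := fun ex hx => by have := hlen ex hx; omega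
      have hchar_iff : ∀ ex ∈ examples,
          (e0.toList.take (j+1) <+: ex.toList ↔ ex.toList.getD j ' ' = e0.toList.getD j ' ') :=
        fun ex hx => pv_prefix_succ _ _ j hjp (hjs ex hx) (hinv ex hx)
      have hpre : (PySem.Str.slice e0 none (some ((j+1 : Nat) : Int))).toList
          = e0.toList.take (j+1) := by
        rw [PySem.Str.toList_slice, PySem.Chars.slice_eq_listSlice]
        exact PySem.List.slice_to_natCast e0.toList (j+1)
      by_cases hm : (examples.any (fun ex => ex.toList.getD j ' ' != e0.toList.getD j ' ')) = true
      · -- mismatch at column j: both loops stop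
        obtain ⟨ex, hx, hne⟩ := List.any_eq_true.mp hm
        have hne' : ex.toList.getD j ' ' ≠ e0.toList.getD j ' ' := by simpa [bne_iff_ne] using hne
        have hall_false : examples.all
            (fun ex => PySem.Str.startswith ex (PySem.Str.slice e0 none (some ((j+1 : Nat) : Int)))) = false := by
          apply List.all_eq_false.mpr
          refine ⟨ex, hx, ?_⟩
          simp only [PySem.Str.startswith_eq, hpre, Bool.not_eq_true]
          rw [Bool.eq_false_iff]
          intro hsw
          exact hne' ((hchar_iff ex hx).mp ((PySem.Chars.startswith_iff _ _).mp hsw))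
        simp only [pvALoop, pvBScan]
        rw [if_pos hm, if_neg (by simp only [hall_false]; decide)]
        rw [PySem.List.pyRange_one_eq_nil (le_refl ((j:Int)+1))]
        simp
      · -- all columns agree at j: both loops continue
        have hm' : (examples.any (fun ex => ex.toList.getD j ' ' != e0.toList.getD j ' ')) = false :=
          Bool.eq_false_iff.mpr hm
        have hall : ∀ ex ∈ examples, ex.toList.getD j ' ' = e0.toList.getD j ' ' := by
          intro ex hx
          by_contra hne
          exact hm (List.any_eq_true.mpr ⟨ex, hx, by simpa [bne_iff_ne] using hne⟩)
        have hinv' : ∀ ex ∈ examples, e0.toList.take (j+1) <+: ex.toList :=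
          fun ex hx => (hchar_iff ex hx).mpr (hall ex hx)
        have hcond : examples.all
            (fun ex => PySem.Str.startswith ex (PySem.Str.slice e0 none (some ((j+1 : Nat) : Int)))) = true := by
          apply List.all_eq_true.mpr
          intro ex hx
          simp only [PySem.Str.startswith_eq, hpre]
          exact (PySem.Chars.startswith_iff _ _).mpr (hinv' ex hx)
        have hlen' : ∀ ex ∈ examples, (j+1) + n ≤ ex.toList.length := by
          intro ex hx; have := hlen ex hx; omega
        have hrec := ih (j+1) (acc ++ [PySem.Str.slice e0 none (some ((j+1 : Nat) : Int))]) hlen' hinv'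
        simp only [pvALoop, pvBScan]
        rw [if_pos hcond, if_neg (by simp only [hm']; decide)]
        have hge : j + 1 ≤ pvBScan examples e0 (j+1) n := pv_bScan_ge examples e0 n (j+1)
        rw [hrec]
        rw [PySem.List.pyRange_one_cons (a := (j:Int)+1)
          (b := (pvBScan examples e0 (j+1) n : Int)+1) (by exact_mod_cast Nat.lt_succ_of_le hge)]
        push_cast
        simp [List.append_assoc]

-- ===== VERDICT (by name: the statement is the Claim_ definition above) =====
theorem find_common_prefixes_py_spec : Claim_equal_find_common_prefixes_py := by
  intro examples _
  unfold Spec_find_common_prefixes_py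
  match examples with
  | [] => rfl
  | e0 :: rest =>
      simp only [find_common_prefixes_py, find_common_prefixes_py_alt]
      set exs := e0 :: rest with hexs
      set k : Int := (PySem.List.min? (exs.map (fun ex => PySem.Str.len ex)) id).getD 0 with hk
      have he : e0 ∈ exs := List.mem_cons_self
      have hlen : ∀ ex ∈ exs, 0 + k.toNat ≤ ex.toList.length := by
        intro ex hx
        rcases hmin : PySem.List.min? (exs.map (fun ex => PySem.Str.len ex)) id with _ | m
        · rw [hk, hmin]; simp
        · have hm := PySem.List.min?_isMin hmin (PySem.Str.len ex)
            (List.mem_map_of_mem hx)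
          simp only [id_eq, PySem.Str.len_eq] at hm
          rw [hk, hmin]
          simp only [Option.getD_some]
          omega
      have h0 := pv_loop_eq exs e0 he k.toNat 0 [] hlen
        (by intro ex hx; simp)
      simpa using h0
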